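-- pv_equiv track=rewrite | github.com/bentenjamin/rubik | helper.py | optimise_4_to_1
-- ===== SOURCE A (Python) =====
-- def optimise_4_to_1(moves):
--     i = 0
--     changed = False
--     while i < len(moves) - 3:
--         if moves[i] == moves[i + 1] == moves[i + 2] == moves[i + 3]:
--             del moves[i:i + 4]
--             changed = True
--         else:
--             i += 1
--     if changed:
--         optimise_4_to_1(moves)
--     return(moves)
-- ===== SOURCE B (Python) =====
-- def optimise_4_to_1(moves):
--     # Single-pass stack of (move, run-count); a run that reaches 4 is dropped.
--     stack = []
--     for m in moves:
--         if stack and stack[-1][0] == m: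
--             if stack[-1][1] == 3:
--                 stack.pop()
--             else:
--                 stack[-1] = (m, stack[-1][1] + 1)
--         else:
--             stack.append((m, 1))
--     out = []
--     for m, k in stack:
--         out.extend([m] * k)
--     moves[:] = out  # A mutates its argument in place; do the same
--     return moves
-- ===== Notes on version B (the rewrite author's own statement) =====
-- stated objective: faster
-- what changed: Replaces A's repeated rescanning passes with in-place quadruple deletion (recursing until no change) by a single left-to-right pass over a stack of (move, run-count) pairs that drops a run when its count reaches 4.
import Mathlib
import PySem

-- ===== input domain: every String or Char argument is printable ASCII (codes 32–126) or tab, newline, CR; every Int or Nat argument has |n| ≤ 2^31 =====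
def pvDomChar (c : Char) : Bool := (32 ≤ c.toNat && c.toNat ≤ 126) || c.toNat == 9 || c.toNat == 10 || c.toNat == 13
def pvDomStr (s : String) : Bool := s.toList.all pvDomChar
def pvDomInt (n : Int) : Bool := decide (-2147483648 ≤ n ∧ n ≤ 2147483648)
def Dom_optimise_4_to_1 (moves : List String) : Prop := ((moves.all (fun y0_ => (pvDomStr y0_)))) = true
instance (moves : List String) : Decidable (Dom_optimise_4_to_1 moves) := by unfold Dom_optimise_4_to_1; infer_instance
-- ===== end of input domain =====

-- B replaces A's quadratic rescan-and-delete passes by one linear pass over a (move, run-count)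
-- stack; equivalence is about the RETURN value only (both Pythons also mutate `moves` in place).

-- ===== PORT A =====
-- the while loop of A: index i, in-place slice deletion, `changed` flag.
-- `fuel` only makes the loop total: each iteration strictly decreases moves.length - i,
-- so fuel = moves.length + 1 (supplied below) always suffices and the 0-case is never hit.
def loopA : Nat → List String → Nat → Bool → List String × Bool
  | 0, moves, _, changed => (moves, changed)
  | fuel + 1, moves, i, changed =>
    if h : i + 3 < moves.length then
      if moves[i]'(Nat.lt_of_le_of_lt (Nat.le_add_right i 3) h) =
           moves[i+1]'(Nat.lt_of_le_of_lt (Nat.add_le_add_left (by decide) i) h) ∧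
         moves[i+1]'(Nat.lt_of_le_of_lt (Nat.add_le_add_left (by decide) i) h) =
           moves[i+2]'(Nat.lt_of_le_of_lt (Nat.add_le_add_left (by decide) i) h) ∧
         moves[i+2]'(Nat.lt_of_le_of_lt (Nat.add_le_add_left (by decide) i) h) =
           moves[i+3]'h then
        loopA fuel (moves.take i ++ moves.drop (i+4)) i true
      else
        loopA fuel moves (i+1) changed
    else (moves, changed)

-- A's tail recursion (`if changed: optimise_4_to_1(moves)`); again fuel only makes it total:
-- a changed pass removes at least 4 elements, so moves.length + 1 rounds always suffice.
def optA : Nat → List String → List String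
  | 0, moves => moves
  | fuel + 1, moves =>
    let r := loopA (moves.length + 1) moves 0 false
    if r.2 = true then optA fuel r.1 else r.1

def optimise_4_to_1 (moves : List String) : List String :=
  optA (moves.length + 1) moves

-- ===== PORT B =====
-- one step of B's for-loop: update the (move, run-count) stack (head = top of stack)
def stepB (st : List (String × Nat)) (x : String) : List (String × Nat) :=
  match st with
  | (y, k) :: rest =>
      if y = x then (if k = 3 then rest else (y, k+1) :: rest)
      else (x, 1) :: (y, k) :: rest
  | [] => [(x, 1)]

def optimise_4_to_1_alt (moves : List String) : List String :=
  ((moves.foldl stepB []).reverse).flatMap (fun p => List.replicate p.2 p.1)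

-- ===== PRECONDITION & SPEC =====
def Spec_optimise_4_to_1 (moves : List String) (out : List String) : Prop := out = optimise_4_to_1_alt moves
instance (moves : List String) (out : List String) : Decidable (Spec_optimise_4_to_1 moves out) := by unfold Spec_optimise_4_to_1; infer_instance

-- ===== CLAIM (what is proved, stated in full; the proofs are below) =====
def Claim_equal_optimise_4_to_1 : Prop := ∀ (moves : List String), Dom_optimise_4_to_1 moves → Spec_optimise_4_to_1 moves (optimise_4_to_1 moves)

-- ===== LEMMAS AND PROOFS =====

-- decode a stack back into the move list it represents
def decodeB (st : List (String × Nat)) : List String :=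
  st.reverse.flatMap (fun p => List.replicate p.2 p.1)

theorem decodeB_cons (p : String × Nat) (st : List (String × Nat)) :
    decodeB (p :: st) = decodeB st ++ List.replicate p.2 p.1 := by
  simp [decodeB]

-- stack invariant: adjacent moves differ, counts are in 1..3
def GoodB : List (String × Nat) → Prop
  | [] => True
  | [(_, k)] => 1 ≤ k ∧ k ≤ 3
  | (y, k) :: (z, l) :: rest => (1 ≤ k ∧ k ≤ 3) ∧ y ≠ z ∧ GoodB ((z, l) :: rest)

theorem goodB_tail (p : String × Nat) (st : List (String × Nat)) (h : GoodB (p :: st)) :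
    GoodB st := by
  match p, st with
  | (y, k), [] => trivial
  | (y, k), (z, l) :: rest => exact h.2.2

theorem goodB_bounds (y : String) (k : Nat) (st : List (String × Nat))
    (h : GoodB ((y, k) :: st)) : 1 ≤ k ∧ k ≤ 3 := by
  match st with
  | [] => exact h
  | (z, l) :: rest => exact h.1

theorem goodB_step (st : List (String × Nat)) (x : String) (h : GoodB st) :
    GoodB (stepB st x) := by
  match st with
  | [] => exact ⟨by omega, by omega⟩
  | (y, k) :: rest =>
      simp only [stepB]
      split_ifs with h1 h2
      · exact goodB_tail _ _ h
      · have hb := goodB_bounds y k rest h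
        match rest with
        | [] => exact ⟨by omega, by omega⟩
        | (z, l) :: r => exact ⟨⟨by omega, by omega⟩, h.2.1, h.2.2⟩
      · exact ⟨⟨by omega, by omega⟩, fun he => h1 he.symm, h⟩

theorem goodB_foldl (xs : List String) (st : List (String × Nat)) (h : GoodB st) :
    GoodB (xs.foldl stepB st) := by
  induction xs generalizing st with
  | nil => exact h
  | cons a xs ih => exact ih _ (goodB_step st a h)

-- feeding four equal moves into a good stack is the identity
theorem step4_id (st : List (String × Nat)) (x : String) (h : GoodB st) :
    stepB (stepB (stepB (stepB st x) x) x) x = st := by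
  match st with
  | [] => simp [stepB]
  | (y, k) :: rest =>
      by_cases hyx : y = x
      · subst hyx
        have hb := goodB_bounds y k rest h
        obtain ⟨hb1, hb2⟩ := hb
        match rest with
        | [] => interval_cases k <;> simp [stepB]
        | (z, l) :: r =>
            have hz : y ≠ z := h.2.1
            interval_cases k <;> simp [stepB, hz.symm]
      · simp [stepB, hyx]

-- deleting a quadruple anywhere does not change the final stack
theorem stack_del (u v : List String) (x : String) :
    (u ++ (x :: x :: x :: x :: v)).foldl stepB [] = (u ++ v).foldl stepB [] := by
  rw [List.foldl_append, List.foldl_append]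
  show List.foldl stepB (stepB (stepB (stepB (stepB (u.foldl stepB []) x) x) x) x) v = _
  rw [step4_id _ _ (goodB_foldl u [] trivial)]

-- no quadruple of equal adjacent moves
def QF (xs : List String) : Prop :=
  ∀ (u v : List String) (y : String), xs ≠ u ++ (y :: y :: y :: y :: v)

theorem qf_of_snoc (xs : List String) (x : String) (h : QF (xs ++ [x])) : QF xs := by
  intro u v y he
  exact h u (v ++ [x]) y (by simp [he])

-- on quadruple-free input, B reproduces the input
theorem decode_qf (xs : List String) (h : QF xs) :
    decodeB (xs.foldl stepB []) = xs := by
  induction xs using List.reverseRecOn with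
  | nil => simp [decodeB]
  | append_singleton xs x ih =>
      have hxs := ih (qf_of_snoc xs x h)
      rw [List.foldl_append, List.foldl_cons, List.foldl_nil]
      match hst : xs.foldl stepB [] with
      | [] =>
          have hnil : xs = [] := by rw [hst] at hxs; simpa [decodeB] using hxs.symm
          simp [hnil, stepB, decodeB]
      | (y, k) :: rest =>
          rw [hst] at hxs
          simp only [stepB]
          by_cases hyx : y = x
          · subst hyx
            by_cases hk3 : k = 3
            · exfalso
              subst hk3
              refine h (decodeB rest) [] y ?_
              rw [← hxs, decodeB_cons]
              simp [List.replicate]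
            · rw [if_pos rfl, if_neg hk3, decodeB_cons, ← hxs, decodeB_cons]
              rw [List.replicate_succ']
              simp
          · rw [if_neg hyx, decodeB_cons, ← hxs, decodeB_cons]
            simp

-- the loop of A never changes the final stack of B
theorem loopA_stack (fuel : Nat) (moves : List String) (i : Nat) (changed : Bool) :
    ((loopA fuel moves i changed).1).foldl stepB [] = moves.foldl stepB [] := by
  induction fuel generalizing moves i changed with
  | zero => rfl
  | succ fuel ih =>
      show ((if h : i + 3 < moves.length then _ else _ : List String × Bool)).1.foldl stepB [] = _
      split_ifs with h hq
      · rw [ih]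
        obtain ⟨h1, h2, h3⟩ := hq
        have hd : moves.drop i = moves[i] :: moves[i+1] :: moves[i+2] :: moves[i+3] :: moves.drop (i+4) := by
          rw [List.drop_eq_getElem_cons (by omega), List.drop_eq_getElem_cons (by omega),
              List.drop_eq_getElem_cons (by omega), List.drop_eq_getElem_cons (by omega)]
        have hm : moves = moves.take i ++ (moves[i] :: moves[i] :: moves[i] :: moves[i] :: moves.drop (i+4)) := by
          conv_lhs => rw [← List.take_append_drop i moves]
          rw [hd, ← h3, ← h2, ← h1]
        conv_rhs => rw [hm]
        rw [stack_del]
      · exact ih moves (i+1) changed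
      · rfl

-- `changed` is monotone: once true, it stays true
theorem loopA_true (fuel : Nat) (moves : List String) (i : Nat) :
    (loopA fuel moves i true).2 = true := by
  induction fuel generalizing moves i with
  | zero => rfl
  | succ fuel ih =>
      show ((if h : i + 3 < moves.length then _ else _ : List String × Bool)).2 = true
      split_ifs with h hq
      · exact ih _ _
      · exact ih _ _
      · rfl

-- the loop never grows the list; a true result starting from changed = false means ≥ 1 deletion
theorem loopA_length (fuel : Nat) (moves : List String) (i : Nat) (changed : Bool) :
    (loopA fuel moves i changed).1.length ≤ moves.length ∧
      ((loopA fuel moves i changed).2 = true → changed = true ∨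
        (loopA fuel moves i changed).1.length + 4 ≤ moves.length) := by
  induction fuel generalizing moves i changed with
  | zero => exact ⟨Nat.le_refl _, fun h => Or.inl h⟩
  | succ fuel ih =>
      show (let r := (if h : i + 3 < moves.length then _ else _ : List String × Bool);
            r.1.length ≤ moves.length ∧ (r.2 = true → changed = true ∨ r.1.length + 4 ≤ moves.length))
      split_ifs with h hq
      · have hl : (moves.take i ++ moves.drop (i+4)).length = moves.length - 4 := by
          simp [List.length_take, List.length_drop]; omega
        have := ih (moves.take i ++ moves.drop (i+4)) i true
        refine ⟨by omega, fun _ => Or.inr (by omega)⟩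
      · exact ih moves (i+1) changed
      · exact ⟨Nat.le_refl _, fun h => Or.inl h⟩

-- a pass that ends with changed = false (and enough fuel) returned its input unchanged,
-- and its input has no quadruple at or after position i
theorem loopA_false (fuel : Nat) (moves : List String) (i : Nat) (changed : Bool)
    (hfuel : moves.length - i < fuel)
    (hf : (loopA fuel moves i changed).2 = false) :
    (loopA fuel moves i changed).1 = moves ∧
      ∀ (u v : List String) (y : String), moves = u ++ (y :: y :: y :: y :: v) → u.length < i := by
  induction fuel generalizing moves i changed with
  | zero => omega
  | succ fuel ih =>
      simp only [loopA] at hf ⊢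
      split_ifs at hf ⊢ with h hq
      · exfalso
        rw [loopA_true] at hf
        exact Bool.noConfusion hf
      · obtain ⟨h1, h2⟩ := ih moves (i+1) changed (by omega) hf
        refine ⟨h1, fun u v y he => ?_⟩
        have hlt := h2 u v y he
        rcases Nat.lt_succ_iff_lt_or_eq.1 hlt with hlt' | heq
        · exact hlt'
        · exfalso
          apply hq
          subst he
          subst heq
          have hget : ∀ j : Nat, (hj : j < 4) →
              (u ++ (y :: y :: y :: y :: v))[u.length + j]'(by simp; omega) = y := by
            intro j hj
            rw [List.getElem_append_right (by omega)]
            simp only [Nat.add_sub_cancel_left]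
            interval_cases j <;> rfl
          have g0 := hget 0 (by omega)
          have g1 := hget 1 (by omega)
          have g2 := hget 2 (by omega)
          have g3 := hget 3 (by omega)
          simp only [Nat.add_zero] at g0
          exact ⟨by rw [g0, g1], by rw [g1, g2], by rw [g2, g3]⟩
      · refine ⟨rfl, fun u v y he => ?_⟩
        subst he
        simp [List.length_append] at h
        omega

-- A's outer recursion computes B's result, given enough fuel
theorem optA_eq (fuel : Nat) (moves : List String) (hfuel : moves.length < fuel) :
    optA fuel moves = optimise_4_to_1_alt moves := by
  induction fuel generalizing moves with
  | zero => omega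
  | succ fuel ih =>
      show (let r := loopA (moves.length + 1) moves 0 false;
            if r.2 = true then optA fuel r.1 else r.1) = optimise_4_to_1_alt moves
      by_cases hr : (loopA (moves.length + 1) moves 0 false).2 = true
      · rw [if_pos hr]
        have hlen := (loopA_length (moves.length + 1) moves 0 false).2 hr
        simp only [Bool.false_eq_true, false_or] at hlen
        rw [ih _ (by omega)]
        unfold optimise_4_to_1_alt
        rw [loopA_stack]
      · rw [if_neg hr]
        obtain ⟨h1, h2⟩ := loopA_false (moves.length + 1) moves 0 false (by omega)
          (by simpa using hr)
        rw [h1]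
        have hqf : QF moves := by
          intro u v y he
          exact absurd (h2 u v y he) (by omega)
        exact (decode_qf moves hqf).symm

theorem main_eq (moves : List String) :
    optimise_4_to_1 moves = optimise_4_to_1_alt moves :=
  optA_eq (moves.length + 1) moves (Nat.lt_succ_self _)

-- ===== VERDICT (by name: the statement is the Claim_ definition above) =====
theorem optimise_4_to_1_spec : Claim_equal_optimise_4_to_1 := by
  intro moves _
  exact main_eq moves
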